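-- pv_equiv track=rewrite | github.com/mwstw/aaa | aaa_2_12_chernousov.py | find_bad_values
-- ===== SOURCE A (Python) =====
-- def find_bad_values(a):
--     opened_brackets = '[{('
--     closed_brackets = ']})'
--     brackets_needed_to_find = []
--     bad_brackets = []
--     i = 0
--     while i < len(a):
--         # если скобка открывающая, то мы хотим найти для закрывающую
--         # поэтому складываем скобки, которые хотим найти, в список
--         if opened_brackets.find(a[i]) != -1:
--             brackets_needed_to_find.append(closed_brackets[opened_brackets.find(a[i])])
--         if closed_brackets.find(a[i]) != -1:
--             # если мы нашли скобку в списке тех, которые надо закрыть, то удаляем ее из этого списка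
--             if a[i] in brackets_needed_to_find:
--                 j = 0
--                 while j < len(brackets_needed_to_find):
--                     if brackets_needed_to_find[j] == a[i]:
--                         del (brackets_needed_to_find[j])
--                         break
--                     else:
--                         j += 1
--             # если не нашли скобку, которую надо закрыть, то считаем ее "плохой"
--             else:
--                 bad_brackets.append(a[i])
--         i += 1
--     # добавляем к списку "плохих" скобок те, для которых не нашлось закрывающих
--     for c in brackets_needed_to_find:
--         bad_brackets.append(opened_brackets[closed_brackets.find(c)])
--     return(bad_brackets)
-- ===== SOURCE B (Python) =====
-- def find_bad_values(a):
--     # Two counting passes, O(n): pass 1 emits unmatchable closing brackets and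
--     # computes per-type matched counts; pass 2 emits the surviving (unmatched)
--     # opening brackets in string order.
--     close_of = {'[': ']', '{': '}', '(': ')'}
--     open_of = {']': '[', '}': '{', ')': '('}
--     opens = {'[': 0, '{': 0, '(': 0}
--     matched = {'[': 0, '{': 0, '(': 0}
--     bad = []
--     for ch in a:
--         if ch in close_of:
--             opens[ch] += 1
--         elif ch in open_of:
--             o = open_of[ch]
--             if matched[o] < opens[o]:
--                 matched[o] += 1
--             else:
--                 bad.append(ch)
--     seen = {'[': 0, '{': 0, '(': 0}
--     for ch in a:
--         if ch in close_of:
--             if seen[ch] >= matched[ch]: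
--                 bad.append(ch)
--             seen[ch] += 1
--     return bad
-- ===== Notes on version B (the rewrite author's own statement) =====
-- stated objective: faster
-- what changed: Replaced the quadratic needed-list scanning (membership test + linear delete per closing bracket, plus list build-up) with two O(n) counting passes: per-type open/matched counters emit unmatchable closing brackets in pass one and the surviving unmatched opening brackets in string order in pass two.
import Mathlib
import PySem

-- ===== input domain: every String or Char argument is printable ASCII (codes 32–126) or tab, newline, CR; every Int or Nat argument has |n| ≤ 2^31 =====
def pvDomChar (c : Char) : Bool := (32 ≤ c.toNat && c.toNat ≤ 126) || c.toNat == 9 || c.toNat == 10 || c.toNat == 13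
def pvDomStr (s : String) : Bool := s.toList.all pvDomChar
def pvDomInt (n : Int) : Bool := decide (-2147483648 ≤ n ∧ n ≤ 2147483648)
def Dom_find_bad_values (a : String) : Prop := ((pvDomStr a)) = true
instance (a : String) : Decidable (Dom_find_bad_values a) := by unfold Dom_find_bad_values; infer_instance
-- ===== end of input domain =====

-- B replaces A's quadratic needed-list scanning with two linear counting passes
-- (per-bracket-type open/matched counters); measured asymptotically faster.

-- ===== PORT A =====
-- the inner while loop of A: scan brackets_needed_to_find, delete the first
-- element equal to c, then break
def pvDelFirst : List String → String → List String
  | [], _ => []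
  | x :: xs, c => if x = c then xs else x :: pvDelFirst xs c

-- the body of A's while loop over the characters of a (a[i] is the 1-char string
-- String.singleton c).  The string indexings closed_brackets[k] / opened_brackets[k]
-- are reached only with k = find result ≠ -1, hence in range: .getD ' ' is never used.
def pvStepA (st : List String × List String) (c : Char) : List String × List String :=
  let st1 :=
    if PySem.Str.find "[{(" (String.singleton c) ≠ -1 then
      (st.1 ++ [String.singleton ((PySem.Str.pyGet? "]})" (PySem.Str.find "[{(" (String.singleton c))).getD ' ')], st.2)
    else st
  if PySem.Str.find "]})" (String.singleton c) ≠ -1 then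
    if String.singleton c ∈ st1.1 then (pvDelFirst st1.1 (String.singleton c), st1.2)
    else (st1.1, st1.2 ++ [String.singleton c])
  else st1

def find_bad_values (a : String) : List String :=
  let r := a.toList.foldl pvStepA ([], [])
  -- for c in brackets_needed_to_find: bad_brackets.append(opened_brackets[closed_brackets.find(c)])
  r.2 ++ r.1.map (fun c => String.singleton ((PySem.Str.pyGet? "[{(" (PySem.Str.find "]})" c)).getD ' '))

-- ===== PORT B =====
-- Source B's dicts have the three fixed keys '[','{','(' ; they are transcribed as
-- total functions Char → Nat updated with Function.update.
def pvIsOpen (c : Char) : Bool := c = '[' || c = '{' || c = '('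

def pvOpenOf? (c : Char) : Option Char :=
  if c = ']' then some '[' else if c = '}' then some '{' else if c = ')' then some '(' else none

-- pass 1 of Source B: count opens, match closings, emit bad closings
def pvStepB1 (st : (Char → Nat) × (Char → Nat) × List String) (ch : Char) :
    (Char → Nat) × (Char → Nat) × List String :=
  if pvIsOpen ch then (Function.update st.1 ch (st.1 ch + 1), st.2.1, st.2.2)
  else
    match pvOpenOf? ch with
    | some o =>
        if st.2.1 o < st.1 o then (st.1, Function.update st.2.1 o (st.2.1 o + 1), st.2.2)
        else (st.1, st.2.1, st.2.2 ++ [String.singleton ch])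
    | none => st

-- pass 2 of Source B: emit the surviving opening brackets in string order
def pvStepB2 (matched : Char → Nat) (st : (Char → Nat) × List String) (ch : Char) :
    (Char → Nat) × List String :=
  if pvIsOpen ch then
    (Function.update st.1 ch (st.1 ch + 1),
     if st.1 ch ≥ matched ch then st.2 ++ [String.singleton ch] else st.2)
  else st

def find_bad_values_alt (a : String) : List String :=
  let p1 := a.toList.foldl pvStepB1 ((fun _ => 0), (fun _ => 0), [])
  (a.toList.foldl (pvStepB2 p1.2.1) ((fun _ => 0), p1.2.2)).2

-- ===== PRECONDITION & SPEC =====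
def Spec_find_bad_values (a : String) (out : List String) : Prop := out = find_bad_values_alt a
instance (a : String) (out : List String) : Decidable (Spec_find_bad_values a out) := by unfold Spec_find_bad_values; infer_instance

-- ===== CLAIM (what is proved, stated in full; the proofs are below) =====
def Claim_equal_find_bad_values : Prop := ∀ (a : String), Dom_find_bad_values a → Spec_find_bad_values a (find_bad_values a)

-- ===== LEMMAS AND PROOFS =====

-- closing bracket of an opening bracket (proof-side)
def pvCloseOf (c : Char) : Char := if c = '[' then ']' else if c = '{' then '}' else ')'

-- the opening brackets of p that survive after skipping, per type t, the first
-- (m t) openings of type t — A's brackets_needed_to_find is exactly their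
-- closing brackets in order (pvInv below), and B's pass 2 emits exactly them
-- (pvPass2_eq below).
def pvSurv : List Char → (Char → Nat) → List Char
  | [], _ => []
  | c :: r, m =>
      if pvIsOpen c then
        (if m c = 0 then c :: pvSurv r m else pvSurv r (Function.update m c (m c - 1)))
      else pvSurv r m

theorem pvOpen_cases {c : Char} (h : pvIsOpen c = true) : c = '[' ∨ c = '{' ∨ c = '(' := by
  simp [pvIsOpen] at h; tauto

theorem pvClose_cases {c t : Char} (h : pvOpenOf? c = some t) :
    (c = ']' ∧ t = '[') ∨ (c = '}' ∧ t = '{') ∨ (c = ')' ∧ t = '(') := by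
  unfold pvOpenOf? at h
  split_ifs at h <;> simp_all [eq_comm]

theorem pvFindOpen_neg {c : Char} (h : pvIsOpen c = false) :
    PySem.Chars.find ['[','{','('] [c] = -1 := by
  rw [PySem.Chars.find_eq_neg_one_iff]
  intro hin
  have h2 := hin.sublist.subset
  simp [pvIsOpen] at h h2
  tauto

theorem pvFindClose_neg {c : Char} (h : pvOpenOf? c = none) :
    PySem.Chars.find [']','}',')'] [c] = -1 := by
  rw [PySem.Chars.find_eq_neg_one_iff]
  intro hin
  have h2 := hin.sublist.subset
  unfold pvOpenOf? at h
  split_ifs at h <;> simp_all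

theorem pvStepA_open {c : Char} (h : pvIsOpen c = true) (st : List String × List String) :
    pvStepA st c = (st.1 ++ [String.singleton (pvCloseOf c)], st.2) := by
  rcases pvOpen_cases h with rfl | rfl | rfl
  · simp [pvStepA, pvCloseOf,
      (by decide : PySem.Chars.find ['[','{','('] ['['] = 0),
      (by decide : PySem.Chars.find [']','}',')'] ['['] = -1)]
  · simp [pvStepA, pvCloseOf,
      (by decide : PySem.Chars.find ['[','{','('] ['{'] = 1),
      (by decide : PySem.Chars.find [']','}',')'] ['{'] = -1)]
  · simp [pvStepA, pvCloseOf,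
      (by decide : PySem.Chars.find ['[','{','('] ['('] = 2),
      (by decide : PySem.Chars.find [']','}',')'] ['('] = -1)]

theorem pvStepA_close {c t : Char} (h : pvOpenOf? c = some t) (st : List String × List String) :
    pvStepA st c =
      if String.singleton c ∈ st.1 then (pvDelFirst st.1 (String.singleton c), st.2)
      else (st.1, st.2 ++ [String.singleton c]) := by
  rcases pvClose_cases h with ⟨rfl, rfl⟩ | ⟨rfl, rfl⟩ | ⟨rfl, rfl⟩
  · simp [pvStepA,
      (by decide : PySem.Chars.find ['[','{','('] [']'] = -1),
      (by decide : PySem.Chars.find [']','}',')'] [']'] = 0)]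
  · simp [pvStepA,
      (by decide : PySem.Chars.find ['[','{','('] ['}'] = -1),
      (by decide : PySem.Chars.find [']','}',')'] ['}'] = 1)]
  · simp [pvStepA,
      (by decide : PySem.Chars.find ['[','{','('] [')'] = -1),
      (by decide : PySem.Chars.find [']','}',')'] [')'] = 2)]

theorem pvStepA_other {c : Char} (h1 : pvIsOpen c = false) (h2 : pvOpenOf? c = none)
    (st : List String × List String) : pvStepA st c = st := by
  simp [pvStepA, pvFindOpen_neg h1, pvFindClose_neg h2]

-- evaluation facts about a closing bracket and its opener
theorem pvCloser_facts {c o : Char} (h : pvOpenOf? c = some o) :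
    pvIsOpen c = false ∧ pvIsOpen o = true ∧ String.singleton (pvCloseOf o) = String.singleton c := by
  rcases pvClose_cases h with ⟨rfl, rfl⟩ | ⟨rfl, rfl⟩ | ⟨rfl, rfl⟩ <;> refine ⟨by decide, by decide, by decide⟩

theorem pvOpen_ne_of_closed {t c : Char} (ht : pvIsOpen t = true) (hc : pvIsOpen c = false) : t ≠ c := by
  intro h; rw [h] at ht; rw [ht] at hc; cases hc

-- cs is injective on opening brackets
theorem pvCs_inj {d t : Char} (hd : pvIsOpen d = true) (ht : pvIsOpen t = true)
    (h : String.singleton (pvCloseOf d) = String.singleton (pvCloseOf t)) : d = t := by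
  rcases pvOpen_cases hd with rfl | rfl | rfl <;> rcases pvOpen_cases ht with rfl | rfl | rfl <;>
    first | rfl | (exfalso; revert h; decide)

-- count of a char over cons / snoc, in the orientation the proofs below use
theorem pvCount_cons (d t : Char) (r : List Char) :
    (d :: r).count t = r.count t + (if d = t then 1 else 0) := by
  rw [List.count_cons]
  by_cases h : d = t
  · subst h; simp
  · simp [h]

theorem pvCount_snoc (p : List Char) (c t : Char) :
    (p ++ [c]).count t = p.count t + (if c = t then 1 else 0) := by
  rw [List.count_append, List.count_cons]
  by_cases h : c = t
  · subst h; simp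
  · simp [h]

-- a non-bracket (or closing) character does not change the survivor list
theorem pvSurv_skip {c : Char} (h : pvIsOpen c = false) :
    ∀ (p : List Char) (m : Char → Nat), pvSurv (p ++ [c]) m = pvSurv p m := by
  intro p
  induction p with
  | nil => intro m; simp [pvSurv, h]
  | cons d r ih =>
    intro m
    cases hd : pvIsOpen d
    · simp [pvSurv, hd, ih]
    · by_cases hm : m d = 0 <;> simp [pvSurv, hd, hm, ih]

-- appending an opening bracket appends it to the survivors (if m t opens of type t exist)
theorem pvSurv_append_open {t : Char} (ht : pvIsOpen t = true) :
    ∀ (p : List Char) (m : Char → Nat), m t ≤ p.count t →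
      pvSurv (p ++ [t]) m = pvSurv p m ++ [t] := by
  intro p
  induction p with
  | nil =>
    intro m hm
    simp only [List.count_nil, Nat.le_zero] at hm
    simp [pvSurv, ht, hm]
  | cons d r ih =>
    intro m hm
    rw [pvCount_cons] at hm
    cases hd : pvIsOpen d
    · have hdt : d ≠ t := fun h => by rw [h] at hd; rw [ht] at hd; cases hd
      simp only [List.cons_append, pvSurv, hd, Bool.false_eq_true, if_false]
      exact ih m (by simp [hdt] at hm; omega)
    · by_cases h : d = t
      · subst h
        by_cases hmd : m d = 0
        · simp only [List.cons_append, pvSurv, hd, if_true, hmd]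
          rw [ih m (by omega)]
        · simp only [List.cons_append, pvSurv, hd, if_true, hmd, if_false]
          have hm2 : m d ≤ r.count d + 1 := by simpa using hm
          exact ih _ (by simp [Function.update_self]; omega)
      · have hm' : m t ≤ r.count t := by simp [h] at hm; omega
        by_cases hmd : m d = 0
        · simp only [List.cons_append, pvSurv, hd, if_true, hmd]
          rw [ih m hm']
        · simp only [List.cons_append, pvSurv, hd, if_true, hmd, if_false]
          exact ih _ (by rw [Function.update_of_ne (fun hh => h hh.symm)]; omega)

-- every survivor is an opening bracket
theorem pvSurv_mem_open : ∀ (p : List Char) (m : Char → Nat) {d : Char},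
    d ∈ pvSurv p m → pvIsOpen d = true := by
  intro p
  induction p with
  | nil => intro m d h; simp [pvSurv] at h
  | cons c r ih =>
    intro m d h
    cases hc : pvIsOpen c
    · rw [pvSurv, hc] at h; simp at h; exact ih m h
    · rw [pvSurv, hc] at h
      by_cases hm : m c = 0
      · simp [hm] at h
        rcases h with rfl | h
        · exact hc
        · exact ih m h
      · simp [hm] at h; exact ih _ h

-- survivor count of type t
theorem pvSurv_count {t : Char} (ht : pvIsOpen t = true) :
    ∀ (p : List Char) (m : Char → Nat), m t ≤ p.count t →
      (pvSurv p m).count t = p.count t - m t := by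
  intro p
  induction p with
  | nil => intro m hm; simp_all [pvSurv]
  | cons d r ih =>
    intro m hm
    rw [pvCount_cons] at hm
    rw [pvCount_cons]
    cases hd : pvIsOpen d
    · have hdt : d ≠ t := fun h => by rw [h] at hd; rw [ht] at hd; cases hd
      rw [pvSurv, hd]
      simp only [Bool.false_eq_true, if_false]
      simp only [hdt, if_false] at hm ⊢
      rw [ih m (by omega)]
      omega
    · by_cases h : d = t
      · subst h
        rw [if_pos rfl] at hm ⊢
        by_cases hmd : m d = 0
        · rw [pvSurv, hd, if_pos rfl, if_pos hmd, pvCount_cons, ih m (by omega), if_pos rfl]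
          omega
        · have hm2 : m d ≤ r.count d + 1 := by omega
          rw [pvSurv, hd, if_pos rfl, if_neg hmd,
            ih _ (by simp [Function.update_self]; omega)]
          simp only [Function.update_self]
          omega
      · simp only [h, if_false] at hm ⊢
        simp only [Nat.add_zero]
        by_cases hmd : m d = 0
        · rw [pvSurv, hd, if_pos rfl, if_pos hmd, pvCount_cons, ih m (by omega), if_neg h]
          omega
        · rw [pvSurv, hd, if_pos rfl, if_neg hmd,
            ih _ (by rw [Function.update_of_ne (fun hh => h hh.symm)]; omega)]
          rw [Function.update_of_ne (fun hh => h hh.symm)]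

-- membership of cs t in the mapped survivor list
theorem pvMem_map_cs {t : Char} (ht : pvIsOpen t = true) (p : List Char) (m : Char → Nat) :
    String.singleton (pvCloseOf t) ∈ (pvSurv p m).map (fun d => String.singleton (pvCloseOf d)) ↔
      t ∈ pvSurv p m := by
  constructor
  · intro h
    rcases List.mem_map.mp h with ⟨d, hd, hdt⟩
    rwa [pvCs_inj (pvSurv_mem_open p m hd) ht hdt] at hd
  · intro h; exact List.mem_map.mpr ⟨t, h, rfl⟩

-- deleting the first cs t from the mapped survivors = skipping one more opening of type t
theorem pvDelFirst_surv {t : Char} (ht : pvIsOpen t = true) :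
    ∀ (p : List Char) (m : Char → Nat), m t < p.count t →
      pvDelFirst ((pvSurv p m).map (fun d => String.singleton (pvCloseOf d)))
          (String.singleton (pvCloseOf t)) =
        (pvSurv p (Function.update m t (m t + 1))).map (fun d => String.singleton (pvCloseOf d)) := by
  intro p
  induction p with
  | nil => intro m hm; simp at hm
  | cons d r ih =>
    intro m hm
    rw [pvCount_cons] at hm
    cases hd : pvIsOpen d
    · have hdt : d ≠ t := fun h => by rw [h] at hd; rw [ht] at hd; cases hd
      rw [pvSurv, pvSurv, hd]
      simp only [Bool.false_eq_true, if_false]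
      exact ih m (by simp [hdt] at hm; omega)
    · by_cases hdt : d = t
      · subst hdt
        rw [if_pos rfl] at hm
        by_cases hmd : m d = 0
        · rw [pvSurv, hd, if_pos rfl, if_pos hmd, List.map_cons, pvDelFirst, if_pos rfl,
            pvSurv, hd, if_pos rfl, if_neg (by simp [Function.update_self]),
            Function.update_idem]
          simp only [Function.update_self, Nat.add_sub_cancel, Function.update_eq_self]
        · rw [pvSurv, hd, if_pos rfl, if_neg hmd,
            pvSurv, hd, if_pos rfl, if_neg (by simp [Function.update_self]),
            ih (Function.update m d (m d - 1)) (by simp [Function.update_self]; omega)]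
          simp only [Function.update_idem, Function.update_self]
          have h2 : m d - 1 + 1 = m d + 1 - 1 := by omega
          rw [h2]
      · have hne : String.singleton (pvCloseOf d) ≠ String.singleton (pvCloseOf t) :=
          fun h => hdt (pvCs_inj hd ht h)
        have hm' : m t < r.count t := by simp [hdt] at hm; omega
        by_cases hmd : m d = 0
        · rw [pvSurv, hd, if_pos rfl, if_pos hmd, List.map_cons, pvDelFirst, if_neg hne,
            pvSurv, hd, if_pos rfl,
            if_pos (show Function.update m t (m t + 1) d = 0 by
              rw [Function.update_of_ne hdt]; exact hmd),
            List.map_cons, ih m hm']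
        · rw [pvSurv, hd, if_pos rfl, if_neg hmd,
            pvSurv, hd, if_pos rfl,
            if_neg (show ¬ Function.update m t (m t + 1) d = 0 by
              rw [Function.update_of_ne hdt]; exact hmd),
            ih (Function.update m d (m d - 1))
              (by rw [Function.update_of_ne (fun h => hdt h.symm)]; exact hm')]
          rw [Function.update_of_ne (fun h => hdt h.symm), Function.update_of_ne hdt,
            Function.update_comm hdt]

-- evaluation of B's pass-1 step
theorem pvStepB1_open {c : Char} (h : pvIsOpen c = true) (st : (Char → Nat) × (Char → Nat) × List String) :
    pvStepB1 st c = (Function.update st.1 c (st.1 c + 1), st.2.1, st.2.2) := by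
  simp [pvStepB1, h]

theorem pvStepB1_close {c o : Char} (h : pvOpenOf? c = some o) (st : (Char → Nat) × (Char → Nat) × List String) :
    pvStepB1 st c =
      if st.2.1 o < st.1 o then (st.1, Function.update st.2.1 o (st.2.1 o + 1), st.2.2)
      else (st.1, st.2.1, st.2.2 ++ [String.singleton c]) := by
  simp [pvStepB1, (pvCloser_facts h).1, h]

theorem pvStepB1_other {c : Char} (h1 : pvIsOpen c = false) (h2 : pvOpenOf? c = none)
    (st : (Char → Nat) × (Char → Nat) × List String) : pvStepB1 st c = st := by
  simp [pvStepB1, h1, h2]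

-- the main invariant tying A's loop state to B's pass-1 state
theorem pvInv (p : List Char) :
    (p.foldl pvStepA ([], [])).2 = (p.foldl pvStepB1 ((fun _ => 0), (fun _ => 0), [])).2.2 ∧
    (p.foldl pvStepA ([], [])).1 =
      (pvSurv p (p.foldl pvStepB1 ((fun _ => 0), (fun _ => 0), [])).2.1).map
        (fun d => String.singleton (pvCloseOf d)) ∧
    (∀ t, pvIsOpen t = true →
      (p.foldl pvStepB1 ((fun _ => 0), (fun _ => 0), [])).1 t = p.count t ∧
      (p.foldl pvStepB1 ((fun _ => 0), (fun _ => 0), [])).2.1 t ≤ p.count t) := by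
  induction p using List.reverseRecOn with
  | nil => refine ⟨rfl, by simp [pvSurv], ?_⟩; intro t _; simp
  | append_singleton p c ih =>
    obtain ⟨ih1, ih2, ih3⟩ := ih
    rw [List.foldl_append, List.foldl_append]
    simp only [List.foldl_cons, List.foldl_nil]
    cases hc : pvIsOpen c
    · cases ho : pvOpenOf? c with
      | none =>
        rw [pvStepA_other hc ho, pvStepB1_other hc ho, pvSurv_skip hc]
        refine ⟨ih1, ih2, ?_⟩
        intro t htt
        rw [pvCount_snoc, if_neg (Ne.symm (pvOpen_ne_of_closed htt hc))]
        simpa using ih3 t htt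
      | some o =>
        obtain ⟨-, hoo, hcs⟩ := pvCloser_facts ho
        obtain ⟨hcnt, hle⟩ := ih3 o hoo
        rw [pvStepA_close ho, pvStepB1_close ho, pvSurv_skip hc]
        have hmem :
            String.singleton c ∈ (p.foldl pvStepA ([], [])).1 ↔
              (p.foldl pvStepB1 ((fun _ => 0), (fun _ => 0), [])).2.1 o <
                (p.foldl pvStepB1 ((fun _ => 0), (fun _ => 0), [])).1 o := by
          rw [ih2, ← hcs, pvMem_map_cs hoo, ← List.count_pos_iff, pvSurv_count hoo _ _ hle, hcnt]
          omega
        have hcount : ∀ t, pvIsOpen t = true → (p ++ [c]).count t = p.count t := by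
          intro t htt
          rw [pvCount_snoc, if_neg (Ne.symm (pvOpen_ne_of_closed htt hc))]
          omega
        by_cases hlt :
            (p.foldl pvStepB1 ((fun _ => 0), (fun _ => 0), [])).2.1 o <
              (p.foldl pvStepB1 ((fun _ => 0), (fun _ => 0), [])).1 o
        · rw [if_pos hlt, if_pos (hmem.mpr hlt)]
          dsimp only
          refine ⟨ih1, ?_, ?_⟩
          · rw [ih2, ← hcs, pvDelFirst_surv hoo p _ (by omega)]
          · intro t htt
            rw [hcount t htt]
            refine ⟨(ih3 t htt).1, ?_⟩
            by_cases hto : t = o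
            · subst hto; rw [Function.update_self]; omega
            · rw [Function.update_of_ne hto]; exact (ih3 t htt).2
        · rw [if_neg hlt, if_neg (fun h => hlt (hmem.mp h))]
          dsimp only
          refine ⟨by rw [ih1], ih2, ?_⟩
          intro t htt
          rw [hcount t htt]
          exact ih3 t htt
    · rw [pvStepA_open hc, pvStepB1_open hc]
      dsimp only
      refine ⟨ih1, ?_, ?_⟩
      · rw [pvSurv_append_open hc p _ (ih3 c hc).2, List.map_append, ih2]
        simp
      · intro t htt
        rw [pvCount_snoc]
        by_cases htc : t = c
        · subst htc
          rw [if_pos rfl, Function.update_self]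
          exact ⟨by rw [(ih3 t htt).1], by have := (ih3 t htt).2; omega⟩
        · rw [if_neg (fun hh => htc hh.symm), Function.update_of_ne htc]
          simpa using ih3 t htt

-- B's pass 2 emits exactly the survivors, as singleton strings
theorem pvPass2 (mt : Char → Nat) :
    ∀ (p : List Char) (seen : Char → Nat) (bad : List String),
      (p.foldl (pvStepB2 mt) (seen, bad)).2 =
        bad ++ (pvSurv p (fun t => mt t - seen t)).map String.singleton := by
  intro p
  induction p with
  | nil => intro seen bad; simp [pvSurv]
  | cons c r ih =>
    intro seen bad
    cases hc : pvIsOpen c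
    · rw [List.foldl_cons, pvStepB2, hc]
      simp only [Bool.false_eq_true, if_false]
      rw [ih, pvSurv, hc]
      simp
    · rw [List.foldl_cons, pvStepB2, hc]
      simp only [if_true]
      by_cases h2 : mt c ≤ seen c
      · rw [if_pos h2, ih, pvSurv, hc, if_pos rfl, if_pos (by omega : mt c - seen c = 0)]
        have heq : (fun t => mt t - Function.update seen c (seen c + 1) t) = fun t => mt t - seen t := by
          funext t
          by_cases htc : t = c
          · subst htc; rw [Function.update_self]; omega
          · rw [Function.update_of_ne htc]
        rw [heq]
        simp
      · rw [if_neg h2, ih, pvSurv, hc, if_pos rfl, if_neg (by omega : ¬ (mt c - seen c = 0))]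
        have heq : (fun t => mt t - Function.update seen c (seen c + 1) t) =
            Function.update (fun t => mt t - seen t) c (mt c - seen c - 1) := by
          funext t
          by_cases htc : t = c
          · subst htc; rw [Function.update_self, Function.update_self]; omega
          · rw [Function.update_of_ne htc, Function.update_of_ne htc]
        rw [heq]

-- the final re-mapping of A (needed closing bracket back to its opener) inverts cs
set_option maxHeartbeats 1000000 in
theorem pvFinMap {d : Char} (hd : pvIsOpen d = true) :
    String.singleton ((PySem.Str.pyGet? "[{("
        (PySem.Str.find "]})" (String.singleton (pvCloseOf d)))).getD ' ') = String.singleton d := by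
  rcases pvOpen_cases hd with rfl | rfl | rfl <;> decide

-- ===== VERDICT (by name: the statement is the Claim_ definition above) =====
set_option maxHeartbeats 2000000 in
theorem find_bad_values_spec : Claim_equal_find_bad_values := by
  intro a _
  show find_bad_values a = find_bad_values_alt a
  simp only [find_bad_values, find_bad_values_alt]
  obtain ⟨h1, h2, -⟩ := pvInv a.toList
  rw [pvPass2]
  have hz : (fun t => (a.toList.foldl pvStepB1 ((fun _ => 0), (fun _ => 0), [])).2.1 t -
      (fun _ => (0 : Nat)) t) = (a.toList.foldl pvStepB1 ((fun _ => 0), (fun _ => 0), [])).2.1 := by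
    funext t; simp
  rw [hz, h1, h2, List.map_map]
  congr 1
  apply List.map_congr_left
  intro d hd
  exact pvFinMap (pvSurv_mem_open _ _ hd)
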